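-- pv_equiv track=rewrite | github.com/abbbringu/advent-of-code-python | Day1/Calories.py | findHeighest
-- ===== SOURCE A (Python) =====
-- def findHeighest(lines: list):
--     # Values for returning highest and for temp usage
--     hi = 0
--     temp = 0
--
--     for i in lines:
--         # If not new line, add to temp
--         if i != "\n":
--             temp += int(i)
--         else:
--             # new line is present, decide if we found a new high
--             hi = hi if (hi > temp) else temp
--             temp = 0
--
--     return(hi)
-- ===== SOURCE B (Python) =====
-- def findHeighest(lines: list):
--     # Phase 1: parse every line up front (None marks a group delimiter)
--     vals = [None if i == "\n" else int(i) for i in lines]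
--     # Phase 2: partition into groups at the delimiters (trailing partial group discarded)
--     groups = []
--     cur = []
--     for v in vals:
--         if v is None:
--             groups.append(cur)
--             cur = []
--         else:
--             cur.append(v)
--     # Phase 3: sum each group, then reduce to the maximum with a 0 floor
--     sums = [sum(g) for g in groups]
--     best = 0
--     for s in sums:
--         if s > best:
--             best = s
--     return best
-- ===== Notes on version B (the rewrite author's own statement) =====
-- stated objective: alternative
-- what changed: Replaces A's interleaved accumulate-and-compare single pass with four separate phases: parse all lines, partition the parsed values into groups at the newline delimiters, map each group to its sum, and reduce the sums to a maximum with a 0 floor.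
import Mathlib
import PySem

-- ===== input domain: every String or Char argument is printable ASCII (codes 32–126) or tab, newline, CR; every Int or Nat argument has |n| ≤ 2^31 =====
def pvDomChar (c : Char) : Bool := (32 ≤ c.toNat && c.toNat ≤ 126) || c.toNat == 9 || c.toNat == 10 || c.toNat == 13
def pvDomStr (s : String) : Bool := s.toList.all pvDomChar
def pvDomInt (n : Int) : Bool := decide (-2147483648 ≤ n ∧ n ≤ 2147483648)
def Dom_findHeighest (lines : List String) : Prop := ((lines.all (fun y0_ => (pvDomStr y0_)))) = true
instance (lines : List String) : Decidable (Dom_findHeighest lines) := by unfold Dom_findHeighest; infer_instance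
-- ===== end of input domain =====

-- B re-decomposes A into four phases: parse all lines, partition at the delimiters, sum each group, reduce to a 0-floored max (same return values; equivalence proved below).

-- ===== PORT A =====
-- one interleaved pass: running total `temp`, compared into `hi` at each "\n"
def stepA (st : Int × Int) (i : String) : Int × Int :=
  if i ≠ "\n" then (st.1, st.2 + (PySem.Int.ofStr? i).getD 0)
  else ((if st.1 > st.2 then st.1 else st.2), 0)

def findHeighest (lines : List String) : Int :=
  (lines.foldl stepA (0, 0)).1

-- ===== PORT B =====
-- phase 2 step: partition parsed values at the delimiters (trailing partial group discarded)
def stepB (st : List (List Int) × List Int) (v : Option Int) : List (List Int) × List Int :=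
  match v with
  | none => (st.1 ++ [st.2], [])
  | some x => (st.1, st.2 ++ [x])

def findHeighest_alt (lines : List String) : Int :=
  let vals := lines.map (fun i => if i == "\n" then none else some ((PySem.Int.ofStr? i).getD 0))
  let groups := (vals.foldl stepB ([], [])).1
  let sums := groups.map List.sum
  sums.foldl (fun best s => if s > best then s else best) 0

-- ===== PRECONDITION & SPEC =====
-- closed-form description of Python's int() literal syntax (ASCII):
-- optional surrounding whitespace, optional sign, then digits with single underscore separators
def pvIsWS (c : Char) : Bool := c.toNat = 0x20 || (0x9 ≤ c.toNat && c.toNat ≤ 0xD)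
def pvIsSign (c : Char) : Bool := c.toNat = 0x2B || c.toNat = 0x2D
def pvDigits : List Char := "0123456789".toList

mutual
-- a nonempty digit group: digit (underscore? digit)*
def pvGrpOK : List Char → Bool
  | [] => false
  | c :: rest => pvDigits.contains c && pvTailOK rest
def pvTailOK : List Char → Bool
  | [] => true
  | c :: rest => if c.toNat = 0x5F then pvGrpOK rest else pvDigits.contains c && pvTailOK rest
end

def pvIntLike (s : String) : Bool :=
  let core := ((s.toList.dropWhile pvIsWS).reverse.dropWhile pvIsWS).reverse
  match core with
  | c :: rest => if pvIsSign c then pvGrpOK rest else pvGrpOK (c :: rest)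
  | [] => false

-- Pre_ excludes exactly the inputs on which the Python A raises ValueError:
-- a list element that is neither a newline string nor an int()-parsable string.
def Pre_findHeighest (lines : List String) : Prop :=
  ∀ s ∈ lines, s = "\n" ∨ pvIntLike s = true

instance (lines : List String) : Decidable (Pre_findHeighest lines) := by
  unfold Pre_findHeighest; infer_instance

def pvWitness_findHeighest : List String := ["1", "2", "\n", "30", "\n", "4"]

def Spec_findHeighest (lines : List String) (out : Int) : Prop := out = findHeighest_alt lines
instance (lines : List String) (out : Int) : Decidable (Spec_findHeighest lines out) := by unfold Spec_findHeighest; infer_instance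

-- ===== CLAIM (what is proved, stated in full; the proofs are below) =====
def Claim_equal_findHeighest : Prop := ∀ (lines : List String), Dom_findHeighest lines → Pre_findHeighest lines → Spec_findHeighest lines (findHeighest lines)

-- ===== LEMMAS AND PROOFS =====

-- the partition fold with an accumulated group prefix
theorem foldl_stepB_prefix (vs : List (Option Int)) (gs : List (List Int)) (cur : List Int) :
    vs.foldl stepB (gs, cur) =
      (gs ++ (vs.foldl stepB ([], cur)).1, (vs.foldl stepB ([], cur)).2) := by
  induction vs generalizing gs cur with
  | nil => simp
  | cons v rest ih =>
    match v with
    | none =>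
      simp only [List.foldl_cons, stepB, List.nil_append]
      rw [ih (gs ++ [cur]) [], ih [cur] []]
      simp
    | some x =>
      simp only [List.foldl_cons, stepB]
      exact ih gs (cur ++ [x])

-- main invariant: A's running (hi, temp) matches B's phases started from (hi, cur)
theorem main_inv (lines : List String) (hi : Int) (cur : List Int) :
    (lines.foldl stepA (hi, cur.sum)).1 =
      ((((lines.map (fun i => if i == "\n" then none
            else some ((PySem.Int.ofStr? i).getD 0))).foldl stepB ([], cur)).1.map List.sum).foldl
        (fun best s => if s > best then s else best) hi) := by
  induction lines generalizing hi cur with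
  | nil => simp
  | cons i rest ih =>
    by_cases h : i = "\n"
    · subst h
      simp only [List.map_cons, List.foldl_cons, stepA, stepB, beq_self_eq_true, if_true, ne_eq,
        not_true_eq_false, if_false, List.nil_append]
      rw [foldl_stepB_prefix _ [cur] []]
      have h2 := ih (if hi > cur.sum then hi else cur.sum) []
      rw [show ([] : List Int).sum = 0 from rfl] at h2
      rw [h2]
      simp only [List.singleton_append, List.map_cons, List.foldl_cons]
      congr 1
      split_ifs <;> omega
    · have hb : (i == "\n") = false := by simpa using h
      simp only [List.map_cons, List.foldl_cons, stepA, stepB, hb, ne_eq, h,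
        not_false_eq_true, if_true]
      rw [show cur.sum + (PySem.Int.ofStr? i).getD 0
            = (cur ++ [(PySem.Int.ofStr? i).getD 0]).sum by simp]
      exact ih hi (cur ++ [(PySem.Int.ofStr? i).getD 0])

-- ===== VERDICT (by name: the statement is the Claim_ definition above) =====
theorem findHeighest_spec : Claim_equal_findHeighest := by
  intro lines _ _
  unfold Spec_findHeighest findHeighest findHeighest_alt
  have := main_inv lines 0 []
  simpa using this
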